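-- pv_equiv track=rewrite | github.com/HammadAli64/Testing | backend/coach/agent.py | _heading_outline_from_rows
-- ===== SOURCE A (Python) =====
-- def _heading_outline_from_rows(rows: list) -> str:
--     """Collect # markdown headings from chunks so the model sees doc structure."""
--     headings: list[str] = []
--     seen: set[str] = set()
--     for r in rows:
--         for line in str(r.get("content") or "").splitlines():
--             s = line.strip()
--             if s.startswith("#") and len(s) > 2:
--                 if s not in seen:
--                     seen.add(s)
--                     headings.append(s)
--             if len(headings) >= 70:
--                 break
--         if len(headings) >= 70:
--             break
--     if not headings:
--         return (
--             "(No explicit # headings in indexed text — treat the first strong sentence of each "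
--             "excerpt as the section topic and still anchor tasks to that material.)"
--         )
--     return "\n".join(headings)
-- ===== SOURCE B (Python) =====
-- def _heading_outline_from_rows(rows: list) -> str:
--     """Collect # markdown headings from chunks so the model sees doc structure."""
--     stripped = [
--         ln.strip()
--         for r in rows
--         for ln in str(r.get("content") or "").splitlines()
--     ]
--     found = [s for s in stripped if s.startswith("#") and len(s) > 2]
--     # sort the distinct headings back into first-occurrence order and keep 70
--     headings = sorted(set(found), key=found.index)[:70]
--     if not headings:
--         return (
--             "(No explicit # headings in indexed text — treat the first strong sentence of each "
--             "excerpt as the section topic and still anchor tasks to that material.)"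
--         )
--     return "\n".join(headings)
-- ===== Notes on version B (the rewrite author's own statement) =====
-- stated objective: alternative
-- what changed: Replaces A's online nested loop with seen-set and early breaks by staged passes: collect all stripped lines, filter the heading-shaped ones, then dedup by sorting the distinct headings (set) back into first-occurrence order via key=found.index, sliced to 70.
import Mathlib
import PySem

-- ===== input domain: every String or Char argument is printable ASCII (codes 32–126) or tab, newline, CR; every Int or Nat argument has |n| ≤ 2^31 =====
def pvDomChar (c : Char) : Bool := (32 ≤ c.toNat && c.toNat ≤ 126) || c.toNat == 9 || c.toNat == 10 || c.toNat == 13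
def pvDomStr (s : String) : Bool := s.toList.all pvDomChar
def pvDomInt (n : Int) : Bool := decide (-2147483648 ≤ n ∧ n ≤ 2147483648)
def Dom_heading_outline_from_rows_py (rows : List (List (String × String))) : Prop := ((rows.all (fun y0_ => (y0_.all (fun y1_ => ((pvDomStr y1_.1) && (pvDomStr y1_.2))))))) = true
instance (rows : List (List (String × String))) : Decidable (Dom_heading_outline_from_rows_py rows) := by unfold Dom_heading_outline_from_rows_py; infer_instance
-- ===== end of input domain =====

-- B replaces A's online seen-set loop with early breaks by staged passes: collect all
-- stripped lines, filter the heading-shaped ones, dedup by sorting the distinct headings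
-- (set) back into first-occurrence order with key=found.index, and slice to 70 (alternative).

-- shared primitives: the heading test 's.startswith("#") and len(s) > 2' and the fallback text
def pvPred (s : String) : Bool :=
  PySem.Str.startswith s "#" && decide ((2 : Int) < PySem.Str.len s)

def pvFallback : String :=
  "(No explicit # headings in indexed text — treat the first strong sentence of each excerpt as the section topic and still anchor tasks to that material.)"

-- ===== PORT A =====
-- inner 'for line in …' loop, with the 'if len(headings) >= 70: break' check
def pvInnerA : List String → List String → PySem.Set String → List String × PySem.Set String
  | [], headings, seen => (headings, seen)
  | line :: rest, headings, seen =>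
    let s := PySem.Str.strip line
    let st :=
      if pvPred s then
        if !(PySem.Set.contains seen s) then (headings ++ [s], PySem.Set.add seen s)
        else (headings, seen)
      else (headings, seen)
    if st.1.length ≥ 70 then st else pvInnerA rest st.1 st.2

-- outer 'for r in rows' loop, with its own 'if len(headings) >= 70: break'
def pvOuterA : List (List (String × String)) → List String → PySem.Set String → List String
  | [], headings, _ => headings
  | r :: rest, headings, seen =>
    let content := ((PySem.Dict.mk r).get? "content").getD ""
    let st := pvInnerA (PySem.Str.splitlines content) headings seen
    if st.1.length ≥ 70 then st.1 else pvOuterA rest st.1 st.2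

def heading_outline_from_rows_py (rows : List (List (String × String))) : String :=
  let headings := pvOuterA rows [] PySem.Set.empty
  if headings = [] then pvFallback
  else PySem.Str.join "\n" headings

-- ===== PORT B =====
-- key=found.index: exact here because sorted only ever asks for elements of set(found)
def pvIdx (found : List String) (s : String) : Int :=
  (((PySem.List.index? found s).getD 0 : Nat) : Int)

def heading_outline_from_rows_py_alt (rows : List (List (String × String))) : String :=
  let stripped := rows.flatMap (fun r =>
    (PySem.Str.splitlines (((PySem.Dict.mk r).get? "content").getD "")).map PySem.Str.strip)
  let found := stripped.filter pvPred
  let headings :=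
    (PySem.List.sorted (PySem.Set.ofList found) (pvIdx found) false).take 70
  if headings = [] then pvFallback
  else PySem.Str.join "\n" headings

-- ===== PRECONDITION & SPEC =====
def Spec_heading_outline_from_rows_py (rows : List (List (String × String))) (out : String) : Prop := out = heading_outline_from_rows_py_alt rows
instance (rows : List (List (String × String))) (out : String) : Decidable (Spec_heading_outline_from_rows_py rows out) := by unfold Spec_heading_outline_from_rows_py; infer_instance

-- ===== CLAIM (what is proved, stated in full; the proofs are below) =====
def Claim_equal_heading_outline_from_rows_py : Prop := ∀ (rows : List (List (String × String))), Dom_heading_outline_from_rows_py rows → Spec_heading_outline_from_rows_py rows (heading_outline_from_rows_py rows)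

-- ===== LEMMAS AND PROOFS =====

-- one row's qualifying stripped lines (used by the proof to relate the two shapes)
def pvRowHeads (r : List (String × String)) : List String :=
  ((PySem.Str.splitlines (((PySem.Dict.mk r).get? "content").getD "")).map PySem.Str.strip).filter pvPred

-- first-occurrence dedup of L, dropping anything already in h
def pvDed (h : List String) : List String → List String
  | [] => []
  | s :: t => if s ∈ h then pvDed h t else s :: pvDed (h ++ [s]) t

-- A's flat loop over the qualifying lines (break modelled after each element)
def pvAflat (h : List String) : List String → List String
  | [] => h
  | s :: t =>
    let h' := if s ∈ h then h else h ++ [s]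
    if h'.length ≥ 70 then h' else pvAflat h' t

theorem pvFoldlAdd_eq (L h) : L.foldl PySem.Set.add h = h ++ pvDed h L := by
  induction L generalizing h with
  | nil => simp [pvDed]
  | cons s t ih =>
    by_cases hm : s ∈ h
    · simp [pvDed, hm, List.foldl_cons, ih]
    · simp [pvDed, hm, List.foldl_cons, ih]

theorem pvDedup_eq (L : List String) : PySem.List.dedup L = pvDed [] L := by
  have h1 : PySem.List.dedup L = PySem.Set.ofList L := PySem.List.dedup_eq_ofList L
  have h2 : PySem.Set.ofList L = L.foldl PySem.Set.add [] := PySem.Set.ofList_eq_foldl L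
  rw [h1, h2, pvFoldlAdd_eq]
  simp

theorem pvDed_append (L1 L2 h) :
    pvDed h (L1 ++ L2) = pvDed h L1 ++ pvDed (h ++ pvDed h L1) L2 := by
  induction L1 generalizing h with
  | nil => simp [pvDed]
  | cons s t ih =>
    by_cases hm : s ∈ h
    · simp [pvDed, hm, ih]
    · simp only [List.cons_append, pvDed, hm, ih (h ++ [s])]
      simp

theorem pvInnerA_eq (lines : List String) (h : List String) (hlt : h.length < 70) :
    pvInnerA lines h h =
      (pvAflat h ((lines.map PySem.Str.strip).filter pvPred),
       pvAflat h ((lines.map PySem.Str.strip).filter pvPred)) := by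
  induction lines generalizing h with
  | nil => simp [pvInnerA, pvAflat]
  | cons line rest ih =>
    have hsplit : ((line :: rest).map PySem.Str.strip).filter pvPred =
        if pvPred (PySem.Str.strip line) = true
        then PySem.Str.strip line :: (rest.map PySem.Str.strip).filter pvPred
        else (rest.map PySem.Str.strip).filter pvPred := by
      simp [List.filter_cons]
    rw [hsplit]
    simp only [pvInnerA]
    by_cases hq : pvPred (PySem.Str.strip line) = true
    · rw [if_pos hq, if_pos hq]
      by_cases hm : PySem.Str.strip line ∈ h
      · have hc : PySem.Set.contains h (PySem.Str.strip line) = true := by simpa using hm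
        rw [if_neg (show ¬ ((!PySem.Set.contains h (PySem.Str.strip line)) = true) from by
              rw [hc]; simp),
            if_neg (show ¬ (((h, h) : List String × PySem.Set String).1.length ≥ 70) from
              (by omega : ¬ (h.length ≥ 70)))]
        rw [ih h hlt]
        have hstep : pvAflat h (PySem.Str.strip line :: (rest.map PySem.Str.strip).filter pvPred)
             = pvAflat h ((rest.map PySem.Str.strip).filter pvPred) := by
          simp only [pvAflat]
          rw [if_pos hm, if_neg (show ¬ (h.length ≥ 70) from by omega)]
        rw [hstep]
      · have hadd : PySem.Set.add h (PySem.Str.strip line) = h ++ [PySem.Str.strip line] :=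
          PySem.Set.add_of_not_mem hm
        have hc : PySem.Set.contains h (PySem.Str.strip line) = false := by simpa using hm
        rw [if_pos (show (!PySem.Set.contains h (PySem.Str.strip line)) = true from by
              rw [hc]; simp), hadd]
        by_cases h70' : (h ++ [PySem.Str.strip line]).length ≥ 70
        · rw [if_pos (show ((h ++ [PySem.Str.strip line],
                 (h ++ [PySem.Str.strip line] : PySem.Set String)) :
                 List String × PySem.Set String).1.length ≥ 70 from h70')]
          have hstep : pvAflat h (PySem.Str.strip line :: (rest.map PySem.Str.strip).filter pvPred)
               = h ++ [PySem.Str.strip line] := by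
            simp only [pvAflat]
            rw [if_neg hm, if_pos h70']
          rw [hstep]
        · rw [if_neg (show ¬ (((h ++ [PySem.Str.strip line],
                 (h ++ [PySem.Str.strip line] : PySem.Set String)) :
                 List String × PySem.Set String).1.length ≥ 70) from h70')]
          have hlt' : (h ++ [PySem.Str.strip line]).length < 70 := by
            simp at h70' ⊢
            omega
          rw [ih (h ++ [PySem.Str.strip line]) hlt']
          have hstep : pvAflat h (PySem.Str.strip line :: (rest.map PySem.Str.strip).filter pvPred)
               = pvAflat (h ++ [PySem.Str.strip line]) ((rest.map PySem.Str.strip).filter pvPred) := by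
            simp only [pvAflat]
            rw [if_neg hm, if_neg h70']
          rw [hstep]
    · rw [if_neg hq, if_neg hq,
          if_neg (show ¬ (((h, h) : List String × PySem.Set String).1.length ≥ 70) from
            (by omega : ¬ (h.length ≥ 70)))]
      exact ih h hlt

theorem pvAflat_eq (L h) (hlt : h.length < 70) :
    pvAflat h L = (h ++ pvDed h L).take 70 := by
  induction L generalizing h with
  | nil =>
    simp [pvAflat, pvDed, List.take_of_length_le (by omega : h.length ≤ 70)]
  | cons s t ih =>
    simp only [pvAflat, pvDed]
    by_cases hm : s ∈ h
    · rw [if_pos hm, if_pos hm, if_neg (show ¬ (h.length ≥ 70) from by omega)]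
      exact ih h hlt
    · rw [if_neg hm, if_neg hm]
      by_cases h70 : (h ++ [s]).length ≥ 70
      · have hlen : (h ++ [s]).length = 70 := by simp at h70 ⊢; omega
        rw [if_pos h70]
        have harr : h ++ s :: pvDed (h ++ [s]) t = (h ++ [s]) ++ pvDed (h ++ [s]) t := by simp
        rw [harr, List.take_append, hlen]
        simp [List.take_of_length_le (le_of_eq hlen)]
      · rw [if_neg h70]
        rw [ih (h ++ [s]) (by simp at h70 ⊢; omega)]
        congr 1
        simp

theorem pvOuterA_eq (rows : List (List (String × String))) (h : List String)
    (hlt : h.length < 70) :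
    pvOuterA rows h h = (h ++ pvDed h (rows.flatMap pvRowHeads)).take 70 := by
  induction rows generalizing h with
  | nil => simp [pvOuterA, pvDed, List.take_of_length_le (by omega : h.length ≤ 70)]
  | cons r rest ih =>
    simp only [pvOuterA, List.flatMap_cons]
    rw [pvInnerA_eq (PySem.Str.splitlines (((PySem.Dict.mk r).get? "content").getD "")) h hlt]
    have hfl : pvAflat h (((PySem.Str.splitlines (((PySem.Dict.mk r).get? "content").getD "")).map
        PySem.Str.strip).filter pvPred) = pvAflat h (pvRowHeads r) := rfl
    rw [hfl, pvAflat_eq (pvRowHeads r) h hlt, pvDed_append]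
    by_cases h70 : (((h ++ pvDed h (pvRowHeads r)).take 70).length ≥ 70)
    · rw [if_pos (show ((((h ++ pvDed h (pvRowHeads r)).take 70),
             ((h ++ pvDed h (pvRowHeads r)).take 70 : PySem.Set String)) :
             List String × PySem.Set String).1.length ≥ 70 from h70)]
      have hlen : 70 ≤ (h ++ pvDed h (pvRowHeads r)).length := by
        by_contra hc
        rw [List.length_take] at h70
        omega
      show (h ++ pvDed h (pvRowHeads r)).take 70 =
        List.take 70 (h ++ (pvDed h (pvRowHeads r) ++
          pvDed (h ++ pvDed h (pvRowHeads r)) (rest.flatMap pvRowHeads)))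
      rw [show h ++ (pvDed h (pvRowHeads r) ++ pvDed (h ++ pvDed h (pvRowHeads r)) (rest.flatMap pvRowHeads))
            = (h ++ pvDed h (pvRowHeads r)) ++ pvDed (h ++ pvDed h (pvRowHeads r)) (rest.flatMap pvRowHeads)
          from by simp]
      conv_rhs => rw [List.take_append]
      have hz : 70 - (h ++ pvDed h (pvRowHeads r)).length = 0 := by omega
      rw [hz]
      simp
    · rw [if_neg (show ¬ (((((h ++ pvDed h (pvRowHeads r)).take 70),
             ((h ++ pvDed h (pvRowHeads r)).take 70 : PySem.Set String)) :
             List String × PySem.Set String).1.length ≥ 70) from h70)]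
      have hlen : (h ++ pvDed h (pvRowHeads r)).length < 70 := by
        by_contra hc
        rw [List.length_take] at h70
        omega
      have htx : (h ++ pvDed h (pvRowHeads r)).take 70 = h ++ pvDed h (pvRowHeads r) :=
        List.take_of_length_le (by omega)
      rw [htx, ih (h ++ pvDed h (pvRowHeads r)) hlen]
      congr 1
      simp

theorem pvMain (rows : List (List (String × String))) :
    pvOuterA rows [] PySem.Set.empty = (PySem.List.dedup (rows.flatMap pvRowHeads)).take 70 := by
  have h0 : (PySem.Set.empty : PySem.Set String) = ([] : List String) := rfl
  rw [h0, pvOuterA_eq rows [] (by simp), pvDedup_eq]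
  simp

-- B side: set(found) is in first-occurrence order, so its first indices strictly increase …
theorem pvOfList_pairwise_idx (L : List String) :
    (PySem.Set.ofList L).Pairwise (fun a b => pvIdx L a < pvIdx L b) := by
  induction L using List.reverseRecOn with
  | nil => simp [PySem.Set.ofList]
  | append_singleton xs x ih =>
    rw [PySem.Set.ofList_append_singleton]
    by_cases hm : x ∈ xs
    · have hadd : PySem.Set.add (PySem.Set.ofList xs) x = PySem.Set.ofList xs := by
        apply PySem.Set.add_of_mem
        simp [PySem.Set.mem_ofList, hm]
      rw [hadd]
      refine List.Pairwise.imp_of_mem ?_ ih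
      intro a b ha hb hab
      have ha' : a ∈ xs := (PySem.Set.mem_ofList xs a).1 ha
      have hb' : b ∈ xs := (PySem.Set.mem_ofList xs b).1 hb
      simp only [pvIdx, PySem.List.index?_append_of_mem _ ha',
                 PySem.List.index?_append_of_mem _ hb']
      exact hab
    · have hadd : PySem.Set.add (PySem.Set.ofList xs) x = PySem.Set.ofList xs ++ [x] := by
        apply PySem.Set.add_of_not_mem
        simp [PySem.Set.mem_ofList, hm]
      rw [hadd]
      apply List.pairwise_append.2
      refine ⟨?_, by simp, ?_⟩
      · refine List.Pairwise.imp_of_mem ?_ ih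
        intro a b ha hb hab
        have ha' : a ∈ xs := (PySem.Set.mem_ofList xs a).1 ha
        have hb' : b ∈ xs := (PySem.Set.mem_ofList xs b).1 hb
        simp only [pvIdx, PySem.List.index?_append_of_mem _ ha',
                   PySem.List.index?_append_of_mem _ hb']
        exact hab
      · intro a ha b hb
        have ha' : a ∈ xs := (PySem.Set.mem_ofList xs a).1 ha
        have hb' : b = x := by simpa using hb
        subst hb'
        have hxi : PySem.List.index? (xs ++ [b]) b = some xs.length :=
          PySem.List.index?_append_singleton_self xs b hm
        obtain ⟨k, hk⟩ := Option.isSome_iff_exists.1 ((PySem.List.index?_isSome_iff xs a).2 ha')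
        have hklt : k < xs.length := by
          obtain ⟨hk', _, _⟩ := PySem.List.getElem_of_index?_eq_some hk
          exact hk'
        simp only [pvIdx, PySem.List.index?_append_of_mem _ ha', hk, hxi, Option.getD_some]
        exact_mod_cast hklt

-- … hence sorting set(found) by found.index is the identity: it IS dict-order dedup
theorem pvSorted_ofList_idx (L : List String) :
    PySem.List.sorted (PySem.Set.ofList L) (pvIdx L) false = PySem.Set.ofList L :=
  PySem.List.sorted_eq_of_perm_of_pairwise_lt _ _ (pvIdx L) (List.Perm.refl _) (pvOfList_pairwise_idx L)

-- the collect-then-filter phases of B produce exactly the concatenation of row heads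
theorem pvFound_eq (rows : List (List (String × String))) :
    (rows.flatMap (fun r =>
      (PySem.Str.splitlines (((PySem.Dict.mk r).get? "content").getD "")).map
        PySem.Str.strip)).filter pvPred = rows.flatMap pvRowHeads := by
  induction rows with
  | nil => rfl
  | cons r rest ih =>
    simp only [List.flatMap_cons, List.filter_append, ih, pvRowHeads]

-- ===== VERDICT (by name: the statement is the Claim_ definition above) =====
theorem heading_outline_from_rows_py_spec : Claim_equal_heading_outline_from_rows_py := by
  intro rows _
  unfold Spec_heading_outline_from_rows_py
  simp only [heading_outline_from_rows_py, heading_outline_from_rows_py_alt]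
  rw [pvMain, pvFound_eq, pvSorted_ofList_idx, PySem.List.dedup_eq_ofList]
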